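-- pv_equiv track=rewrite | github.com/BD2KGenomics/nanopore-RNN | nanotensor/trim_signal.py | alignment_stats
-- ===== SOURCE A (Python) =====
-- def alignment_stats(alignment):
--     """Return alignment accuracies"""
--     # create dictionary to keep alignment info
--     alphabet = set(alignment['query'] + alignment['reference'])
--     base_counts = {key: {'matches': 0, 'deletions': 0, 'insertions': 0, 'ref_mismatches': 0, 'query_mismatches': 0}
--                    for key in alphabet}
--     total_counts = {'matches': 0, 'deletions': 0, 'insertions': 0, 'mismatches': 0, "reference": 0, 'read': 0}
--     for ref, query in zip(alignment['reference'], alignment["query"]):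
--         if ref == query:
--             base_counts[ref]['matches'] += 1
--             total_counts['matches'] += 1
--             total_counts['reference'] += 1
--             total_counts['read'] += 1
--         elif ref == '-':
--             base_counts[query]['insertions'] += 1
--             total_counts['insertions'] += 1
--             total_counts['read'] += 1
--
--         elif query == '-':
--             base_counts[ref]['deletions'] += 1
--             total_counts['deletions'] += 1
--             total_counts['reference'] += 1
--         else:
--             total_counts['reference'] += 1
--             total_counts['read'] += 1
--             total_counts['mismatches'] += 1
--             base_counts[ref]['ref_mismatches'] += 1
--             base_counts[query]['query_mismatches'] += 1
--
--     return total_counts, base_counts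
-- ===== SOURCE B (Python) =====
-- def alignment_stats(alignment):
--     """Return alignment accuracies"""
--     query = alignment['query']
--     reference = alignment['reference']
--     pairs = list(zip(reference, query))
--     alphabet = set(query + reference)
--     matches    = sum(1 for r, q in pairs if r == q)
--     insertions = sum(1 for r, q in pairs if r != q and r == '-')
--     deletions  = sum(1 for r, q in pairs if r != q and r != '-' and q == '-')
--     mismatches = sum(1 for r, q in pairs if r != q and r != '-' and q != '-')
--     total_counts = {'matches': matches, 'deletions': deletions,
--                     'insertions': insertions, 'mismatches': mismatches,
--                     'reference': matches + deletions + mismatches,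
--                     'read': matches + insertions + mismatches}
--     base_counts = {
--         k: {'matches':          sum(1 for r, q in pairs if r == q and q == k),
--             'deletions':        sum(1 for r, q in pairs if r != q and r != '-' and q == '-' and r == k),
--             'insertions':       sum(1 for r, q in pairs if r != q and r == '-' and q == k),
--             'ref_mismatches':   sum(1 for r, q in pairs if r != q and r != '-' and q != '-' and r == k),
--             'query_mismatches': sum(1 for r, q in pairs if r != q and r != '-' and q != '-' and q == k)}
--         for k in alphabet}
--     return total_counts, base_counts
-- ===== Notes on version B (the rewrite author's own statement) =====
-- stated objective: alternative
-- what changed: Replaces the single pass that mutates nested counter dicts branch-by-branch with a pure counting formulation: each total and each per-base field is computed independently as a count of zipped (ref,query) pairs satisfying its closed predicate, and the derived totals 'reference'/'read' are sums of the primary counts.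
import Mathlib
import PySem

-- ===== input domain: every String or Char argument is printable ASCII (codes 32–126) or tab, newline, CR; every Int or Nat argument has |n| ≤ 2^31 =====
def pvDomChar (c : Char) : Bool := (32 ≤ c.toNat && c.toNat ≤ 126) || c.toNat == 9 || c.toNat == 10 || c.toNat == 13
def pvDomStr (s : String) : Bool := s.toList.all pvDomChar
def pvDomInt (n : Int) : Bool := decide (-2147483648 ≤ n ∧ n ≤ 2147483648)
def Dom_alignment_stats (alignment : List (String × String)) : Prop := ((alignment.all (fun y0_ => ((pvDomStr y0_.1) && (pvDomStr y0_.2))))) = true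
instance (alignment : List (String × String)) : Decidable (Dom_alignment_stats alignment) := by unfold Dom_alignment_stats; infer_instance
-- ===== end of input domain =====

-- B replaces A's single mutating pass over nested counter dicts by independent per-field
-- counts of the zipped (ref, query) pairs; same results, a different decomposition (not faster).


-- ===== PORT A =====
-- iterating a Python string yields its 1-character strings
def pvOne (c : Char) : String := String.mk [c]

-- the inner dict template {'matches':0,...} of A's comprehension
def pvInit0 : PySem.Dict String Int :=
  PySem.Dict.ofList [("matches", 0), ("deletions", 0), ("insertions", 0), ("ref_mismatches", 0), ("query_mismatches", 0)]

-- one iteration of A's for-loop; Dict.modify k 0 (·+1) is Python's d[k] += 1 (every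
-- touched key is always present: totals are pre-filled, bases are keyed by the alphabet)
def pvStepA (st : PySem.Dict String Int × PySem.Dict String (PySem.Dict String Int)) (p : String × String) :
    PySem.Dict String Int × PySem.Dict String (PySem.Dict String Int) :=
  let tc := st.1
  let bc := st.2
  let ref := p.1
  let query := p.2
  if ref == query then
    (((tc.modify "matches" 0 (· + 1)).modify "reference" 0 (· + 1)).modify "read" 0 (· + 1),
     bc.modify ref pvInit0 (fun d => d.modify "matches" 0 (· + 1)))
  else if ref == "-" then
    ((tc.modify "insertions" 0 (· + 1)).modify "read" 0 (· + 1),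
     bc.modify query pvInit0 (fun d => d.modify "insertions" 0 (· + 1)))
  else if query == "-" then
    ((tc.modify "deletions" 0 (· + 1)).modify "reference" 0 (· + 1),
     bc.modify ref pvInit0 (fun d => d.modify "deletions" 0 (· + 1)))
  else
    (((tc.modify "mismatches" 0 (· + 1)).modify "reference" 0 (· + 1)).modify "read" 0 (· + 1),
     (bc.modify ref pvInit0 (fun d => d.modify "ref_mismatches" 0 (· + 1))).modify query pvInit0
       (fun d => d.modify "query_mismatches" 0 (· + 1)))

def alignment_stats (alignment : List (String × String)) : (List (String × Int)) × (List (String × List (String × Int))) :=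
  match (PySem.Dict.mk alignment).get? "query", (PySem.Dict.mk alignment).get? "reference" with
  | some q, some r =>
      let alphabet : PySem.Set String := PySem.Set.ofList ((q.toList ++ r.toList).map pvOne)
      let base_counts : PySem.Dict String (PySem.Dict String Int) :=
        alphabet.foldl (fun d k => d.insert k pvInit0) PySem.Dict.empty
      let total_counts : PySem.Dict String Int :=
        PySem.Dict.ofList [("matches", 0), ("deletions", 0), ("insertions", 0), ("mismatches", 0), ("reference", 0), ("read", 0)]
      let st := (List.zip (r.toList.map pvOne) (q.toList.map pvOne)).foldl pvStepA (total_counts, base_counts)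
      (st.1.items, st.2.items.map (fun kv => (kv.1, kv.2.items)))
  | _, _ => ([], [])  -- unreachable under Pre_ (Python raises KeyError)

-- ===== PORT B =====
-- B's own copy of the char→1-character-string coercion (Python string iteration)
def pvOneB (c : Char) : String := String.mk [c]

def alignment_stats_alt (alignment : List (String × String)) : (List (String × Int)) × (List (String × List (String × Int))) :=
  match (PySem.Dict.mk alignment).get? "query" with
  | none => ([], [])
  | some q =>
    match (PySem.Dict.mk alignment).get? "reference" with
    | none => ([], [])
    | some r =>
      let pairs := List.zip (r.toList.map pvOneB) (q.toList.map pvOneB)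
      let alphabet : PySem.Set String := PySem.Set.ofList ((q.toList ++ r.toList).map pvOneB)
      let nMat : Int := pairs.countP (fun p => p.1 == p.2)
      let nIns : Int := pairs.countP (fun p => p.1 != p.2 && p.1 == "-")
      let nDel : Int := pairs.countP (fun p => p.1 != p.2 && p.1 != "-" && p.2 == "-")
      let nMis : Int := pairs.countP (fun p => p.1 != p.2 && p.1 != "-" && p.2 != "-")
      ([("matches", nMat), ("deletions", nDel), ("insertions", nIns), ("mismatches", nMis),
        ("reference", nMat + nDel + nMis), ("read", nMat + nIns + nMis)],
       alphabet.map (fun k =>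
         (k, [("matches", (pairs.countP (fun p => p.1 == p.2 && p.2 == k) : Int)),
              ("deletions", (pairs.countP (fun p => p.1 != p.2 && p.1 != "-" && p.2 == "-" && p.1 == k) : Int)),
              ("insertions", (pairs.countP (fun p => p.1 != p.2 && p.1 == "-" && p.2 == k) : Int)),
              ("ref_mismatches", (pairs.countP (fun p => p.1 != p.2 && p.1 != "-" && p.2 != "-" && p.1 == k) : Int)),
              ("query_mismatches", (pairs.countP (fun p => p.1 != p.2 && p.1 != "-" && p.2 != "-" && p.2 == k) : Int))])))

-- ===== PRECONDITION & SPEC =====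
-- Pre_ excludes exactly the inputs on which A raises KeyError: dicts missing the 'query' or 'reference' key.
def Pre_alignment_stats (alignment : List (String × String)) : Prop :=
  (PySem.Dict.mk alignment).contains "query" = true ∧ (PySem.Dict.mk alignment).contains "reference" = true
instance (alignment : List (String × String)) : Decidable (Pre_alignment_stats alignment) := by
  unfold Pre_alignment_stats; infer_instance

def pvWitness_alignment_stats : (List (String × String)) := [("query", "AC-GT"), ("reference", "A-CGA")]

def Spec_alignment_stats (alignment : List (String × String)) (out : (List (String × Int)) × (List (String × List (String × Int)))) : Prop := out = alignment_stats_alt alignment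
instance (alignment : List (String × String)) (out : (List (String × Int)) × (List (String × List (String × Int)))) : Decidable (Spec_alignment_stats alignment out) := by unfold Spec_alignment_stats; infer_instance

-- ===== CLAIM (what is proved, stated in full; the proofs are below) =====
def Claim_equal_alignment_stats : Prop := ∀ (alignment : List (String × String)), Dom_alignment_stats alignment → Pre_alignment_stats alignment → Spec_alignment_stats alignment (alignment_stats alignment)

-- ===== LEMMAS AND PROOFS =====

-- totals dict with explicit field values
def pvTot (a b c d e f : Int) : PySem.Dict String Int :=
  PySem.Dict.mk [("matches", a), ("deletions", b), ("insertions", c), ("mismatches", d), ("reference", e), ("read", f)]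

-- per-base dict with explicit field values
def pvInn (m dl i rm qm : Int) : PySem.Dict String Int :=
  PySem.Dict.mk [("matches", m), ("deletions", dl), ("insertions", i), ("ref_mismatches", rm), ("query_mismatches", qm)]

theorem pvGetD_map {ν : Type} (S : List String) (g : String → ν) (r : String) (hr : r ∈ S) (d0 : ν) :
    (PySem.Dict.mk (S.map (fun k => (k, g k)))).getD r d0 = g r := by
  simp only [PySem.Dict.getD, PySem.Dict.get?]
  induction S with
  | nil => cases hr
  | cons x S ih =>
    rcases List.mem_cons.mp hr with h | h
    · subst h; simp
    · by_cases hx : x == r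
      · simp [hx]; rw [eq_of_beq hx]
      · simp only [List.map_cons, List.find?]
        simp only [hx]
        simpa using ih h

theorem pvModify_map {ν : Type} (S : List String) (g : String → ν) (r : String) (hr : r ∈ S) (d0 : ν) (f : ν → ν) :
    (PySem.Dict.mk (S.map (fun k => (k, g k)))).modify r d0 f
      = PySem.Dict.mk (S.map (fun k => (k, if k = r then f (g k) else g k))) := by
  have hc : (PySem.Dict.mk (S.map (fun k => (k, g k)))).contains r = true := by
    simp [PySem.Dict.contains, List.any_eq_true]
    exact hr
  simp [PySem.Dict.modify, PySem.Dict.insert, hc, pvGetD_map S g r hr d0, List.map_map]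
  intro k hk
  by_cases h : k = r <;> simp [h]

theorem pvTot_matches (a b c d e f : Int) : (pvTot a b c d e f).modify "matches" 0 (· + 1) = pvTot (a+1) b c d e f := rfl
theorem pvTot_deletions (a b c d e f : Int) : (pvTot a b c d e f).modify "deletions" 0 (· + 1) = pvTot a (b+1) c d e f := rfl
theorem pvTot_insertions (a b c d e f : Int) : (pvTot a b c d e f).modify "insertions" 0 (· + 1) = pvTot a b (c+1) d e f := rfl
theorem pvTot_mismatches (a b c d e f : Int) : (pvTot a b c d e f).modify "mismatches" 0 (· + 1) = pvTot a b c (d+1) e f := rfl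
theorem pvTot_reference (a b c d e f : Int) : (pvTot a b c d e f).modify "reference" 0 (· + 1) = pvTot a b c d (e+1) f := rfl
theorem pvTot_read (a b c d e f : Int) : (pvTot a b c d e f).modify "read" 0 (· + 1) = pvTot a b c d e (f+1) := rfl
theorem pvInn_matches (m dl i rm qm : Int) : (pvInn m dl i rm qm).modify "matches" 0 (· + 1) = pvInn (m+1) dl i rm qm := rfl
theorem pvInn_deletions (m dl i rm qm : Int) : (pvInn m dl i rm qm).modify "deletions" 0 (· + 1) = pvInn m (dl+1) i rm qm := rfl
theorem pvInn_insertions (m dl i rm qm : Int) : (pvInn m dl i rm qm).modify "insertions" 0 (· + 1) = pvInn m dl (i+1) rm qm := rfl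
theorem pvInn_refmis (m dl i rm qm : Int) : (pvInn m dl i rm qm).modify "ref_mismatches" 0 (· + 1) = pvInn m dl i (rm+1) qm := rfl
theorem pvInn_querymis (m dl i rm qm : Int) : (pvInn m dl i rm qm).modify "query_mismatches" 0 (· + 1) = pvInn m dl i rm (qm+1) := rfl

theorem pvLoop_char (L : List (String × String)) (S : List String)
    (hL : ∀ p ∈ L, p.1 ∈ S ∧ p.2 ∈ S)
    (a b c d e f : Int) (gm gd gi gr gq : String → Int) :
    L.foldl pvStepA (pvTot a b c d e f, PySem.Dict.mk (S.map (fun k => (k, pvInn (gm k) (gd k) (gi k) (gr k) (gq k)))))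
    = (pvTot (a + (L.countP (fun p => p.1 == p.2) : Int))
             (b + (L.countP (fun p => p.1 != p.2 && p.1 != "-" && p.2 == "-") : Int))
             (c + (L.countP (fun p => p.1 != p.2 && p.1 == "-") : Int))
             (d + (L.countP (fun p => p.1 != p.2 && p.1 != "-" && p.2 != "-") : Int))
             (e + (L.countP (fun p => p.1 == p.2) : Int) + (L.countP (fun p => p.1 != p.2 && p.1 != "-" && p.2 == "-") : Int) + (L.countP (fun p => p.1 != p.2 && p.1 != "-" && p.2 != "-") : Int))
             (f + (L.countP (fun p => p.1 == p.2) : Int) + (L.countP (fun p => p.1 != p.2 && p.1 == "-") : Int) + (L.countP (fun p => p.1 != p.2 && p.1 != "-" && p.2 != "-") : Int)),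
       PySem.Dict.mk (S.map (fun k =>
         (k, pvInn (gm k + (L.countP (fun p => p.1 == p.2 && p.2 == k) : Int))
                   (gd k + (L.countP (fun p => p.1 != p.2 && p.1 != "-" && p.2 == "-" && p.1 == k) : Int))
                   (gi k + (L.countP (fun p => p.1 != p.2 && p.1 == "-" && p.2 == k) : Int))
                   (gr k + (L.countP (fun p => p.1 != p.2 && p.1 != "-" && p.2 != "-" && p.1 == k) : Int))
                   (gq k + (L.countP (fun p => p.1 != p.2 && p.1 != "-" && p.2 != "-" && p.2 == k) : Int)))))) := by
  induction L generalizing a b c d e f gm gd gi gr gq with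
  | nil => simp
  | cons p L ih =>
    obtain ⟨hp1, hp2⟩ := hL p (List.mem_cons_self)
    have hL' : ∀ q ∈ L, q.1 ∈ S ∧ q.2 ∈ S := fun q hq => hL q (List.mem_cons_of_mem _ hq)
    rw [List.foldl_cons]
    by_cases h1 : (p.1 == p.2)
    · have h12 : p.1 = p.2 := eq_of_beq h1
      have e1 : (p.1 != p.2) = false := by simp [bne, h1]
      have hstep : pvStepA (pvTot a b c d e f, PySem.Dict.mk (S.map (fun k => (k, pvInn (gm k) (gd k) (gi k) (gr k) (gq k))))) p
          = (pvTot (a+1) b c d (e+1) (f+1),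
             PySem.Dict.mk (S.map (fun k => (k, pvInn (if k = p.1 then gm k + 1 else gm k) (gd k) (gi k) (gr k) (gq k))))) := by
        simp only [pvStepA, h1, if_pos, pvTot_matches, pvTot_reference, pvTot_read,
          pvModify_map S _ p.1 hp1]
        refine Prod.ext rfl ?_
        refine congrArg PySem.Dict.mk (List.map_congr_left ?_)
        intro k hk
        by_cases hkr : k = p.1 <;> simp [hkr, pvInn_matches]
      rw [hstep, ih hL']
      refine Prod.ext ?_ ?_
      · simp only [pvTot, List.countP_cons, h1, e1]
        simp
        refine ⟨by ring, by ring, by ring⟩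
      · refine congrArg PySem.Dict.mk (List.map_congr_left ?_)
        intro k hk
        by_cases hkr : k = p.1
        · simp [hkr, pvInn, h12]
          omega
        · simp [hkr, pvInn, List.countP_cons, ← h12]
          exact Ne.symm hkr
    · rw [Bool.not_eq_true] at h1
      have h12 : ¬ p.1 = p.2 := by simpa using h1
      have e1 : (p.1 != p.2) = true := by simp [bne, h1]
      by_cases h2 : (p.1 == "-")
      · -- insertion branch
        have h1d : p.1 = "-" := eq_of_beq h2
        have hstep : pvStepA (pvTot a b c d e f, PySem.Dict.mk (S.map (fun k => (k, pvInn (gm k) (gd k) (gi k) (gr k) (gq k))))) p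
            = (pvTot a b (c+1) d e (f+1),
               PySem.Dict.mk (S.map (fun k => (k, pvInn (gm k) (gd k) (if k = p.2 then gi k + 1 else gi k) (gr k) (gq k))))) := by
          simp only [pvStepA, h1, h2, if_pos, if_neg, Bool.false_eq_true, not_false_iff,
            pvTot_insertions, pvTot_read, pvModify_map S _ p.2 hp2]
          refine Prod.ext rfl ?_
          refine congrArg PySem.Dict.mk (List.map_congr_left ?_)
          intro k hk
          by_cases hkr : k = p.2 <;> simp [hkr, pvInn_insertions]
        rw [hstep, ih hL']
        refine Prod.ext ?_ ?_
        · simp only [pvTot, List.countP_cons, h1, e1, h2]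
          simp [h1d]
          refine ⟨by ring, by ring⟩
        · refine congrArg PySem.Dict.mk (List.map_congr_left ?_)
          intro k hk
          by_cases hkr : k = p.2
          · simp [hkr, pvInn, List.countP_cons, h1d]
            have hne : ¬ "-" = p.2 := h1d ▸ h12
            refine ⟨hne, ?_⟩
            simp [hne]
            omega
          · simp [hkr, pvInn, List.countP_cons, h1d]
            exact Ne.symm hkr
      · rw [Bool.not_eq_true] at h2
        have h1nd : ¬ p.1 = "-" := by simpa using h2
        by_cases h3 : (p.2 == "-")
        · -- deletion branch
          have h2d : p.2 = "-" := eq_of_beq h3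
          have hstep : pvStepA (pvTot a b c d e f, PySem.Dict.mk (S.map (fun k => (k, pvInn (gm k) (gd k) (gi k) (gr k) (gq k))))) p
              = (pvTot a (b+1) c d (e+1) f,
                 PySem.Dict.mk (S.map (fun k => (k, pvInn (gm k) (if k = p.1 then gd k + 1 else gd k) (gi k) (gr k) (gq k))))) := by
            simp only [pvStepA, h1, h2, h3, if_pos, if_neg, Bool.false_eq_true, not_false_iff,
              pvTot_deletions, pvTot_reference, pvModify_map S _ p.1 hp1]
            refine Prod.ext rfl ?_
            refine congrArg PySem.Dict.mk (List.map_congr_left ?_)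
            intro k hk
            by_cases hkr : k = p.1 <;> simp [hkr, pvInn_deletions]
          rw [hstep, ih hL']
          refine Prod.ext ?_ ?_
          · simp only [pvTot, List.countP_cons, h1, e1, h2, h3]
            simp [h2d, h1nd]
            refine ⟨by ring, by ring⟩
          · refine congrArg PySem.Dict.mk (List.map_congr_left ?_)
            intro k hk
            by_cases hkr : k = p.1
            · simp [hkr, pvInn, h2, h2d, h1nd]
              omega
            · simp [hkr, pvInn, List.countP_cons, h2, h2d, h1nd]
              exact Ne.symm hkr
        · -- mismatch branch
          rw [Bool.not_eq_true] at h3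
          have h2nd : ¬ p.2 = "-" := by simpa using h3
          have hstep : pvStepA (pvTot a b c d e f, PySem.Dict.mk (S.map (fun k => (k, pvInn (gm k) (gd k) (gi k) (gr k) (gq k))))) p
              = (pvTot a b c (d+1) (e+1) (f+1),
                 PySem.Dict.mk (S.map (fun k => (k, pvInn (gm k) (gd k) (gi k)
                   (if k = p.1 then gr k + 1 else gr k) (if k = p.2 then gq k + 1 else gq k))))) := by
            simp only [pvStepA, h1, h2, h3, if_neg, Bool.false_eq_true, not_false_iff,
              pvTot_mismatches, pvTot_reference, pvTot_read, pvModify_map S _ p.1 hp1]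
            rw [pvModify_map S _ p.2 hp2]
            refine Prod.ext rfl ?_
            refine congrArg PySem.Dict.mk (List.map_congr_left ?_)
            intro k hk
            by_cases hkr : k = p.1
            · have : ¬ k = p.2 := by rw [hkr]; exact h12
              simp [hkr, pvInn_refmis, h12]
            · by_cases hkq : k = p.2 <;> simp [hkr, hkq, pvInn_querymis, Ne.symm h12]
          rw [hstep, ih hL']
          refine Prod.ext ?_ ?_
          · simp only [pvTot, List.countP_cons, h1, e1, h2, h3]
            simp [h1nd, h2nd]
            refine ⟨by ring, by ring, by ring⟩
          · refine congrArg PySem.Dict.mk (List.map_congr_left ?_)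
            intro k hk
            by_cases hkr : k = p.1
            · have hkq : ¬ k = p.2 := by rw [hkr]; exact h12
              simp [hkr, pvInn, e1, h2, h3, h1nd, h2nd, h12, Ne.symm h12]
              omega
            · by_cases hkq : k = p.2
              · simp [hkq, pvInn, e1, h2, h3, h1nd, h2nd, h12, Ne.symm h12]
                omega
              · simp [hkr, hkq, pvInn, e1, h2, h3, h1nd, h2nd, Ne.symm hkr, Ne.symm hkq, h12]

theorem pvBase_init (S : List String) (hS : S.Nodup) :
    S.foldl (fun d k => d.insert k pvInit0) PySem.Dict.empty
      = PySem.Dict.mk (S.map (fun k => (k, pvInn 0 0 0 0 0))) := by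
  apply PySem.Dict.ext
  have h := PySem.Dict.items_foldl_insert_fresh (l := S) (k := fun a => a) (v := fun _ => pvInit0)
      (d := PySem.Dict.empty) (by intro a _; exact PySem.Dict.contains_empty a) (by simpa using hS)
  simpa [show pvInit0 = pvInn 0 0 0 0 0 from rfl] using h

theorem pvOneB_eq : pvOneB = pvOne := rfl

-- ===== VERDICT (by name: the statement is the Claim_ definition above) =====
theorem alignment_stats_spec : Claim_equal_alignment_stats := by
  intro al _ hpre
  unfold Spec_alignment_stats
  obtain ⟨hcq, hcr⟩ := hpre
  rcases hq : (PySem.Dict.mk al).get? "query" with _ | q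
  · rw [PySem.Dict.get?_eq_none_iff_contains] at hq
    rw [hcq] at hq
    cases hq
  rcases hr : (PySem.Dict.mk al).get? "reference" with _ | r
  · rw [PySem.Dict.get?_eq_none_iff_contains] at hr
    rw [hcr] at hr
    cases hr
  simp only [alignment_stats, alignment_stats_alt, hq, hr]
  have hL : ∀ p ∈ List.zip (r.toList.map pvOne) (q.toList.map pvOne),
      p.1 ∈ PySem.Set.ofList ((q.toList ++ r.toList).map pvOne)
        ∧ p.2 ∈ PySem.Set.ofList ((q.toList ++ r.toList).map pvOne) := by
    rintro ⟨x, y⟩ hp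
    obtain ⟨hx, hy⟩ := List.of_mem_zip hp
    constructor
    · rw [PySem.Set.mem_ofList]
      simp only [List.map_append]
      exact List.mem_append_right _ hx
    · rw [PySem.Set.mem_ofList]
      simp only [List.map_append]
      exact List.mem_append_left _ hy
  rw [show (PySem.Dict.ofList [("matches", (0:Int)), ("deletions", 0), ("insertions", 0), ("mismatches", 0), ("reference", 0), ("read", 0)]) = pvTot 0 0 0 0 0 0 from rfl]
  rw [pvBase_init _ (PySem.Set.nodup_ofList _)]
  rw [show (fun k => (k, pvInn 0 0 0 0 0)) = (fun k => (k, pvInn ((fun _ => (0:Int)) k) ((fun _ => (0:Int)) k) ((fun _ => (0:Int)) k) ((fun _ => (0:Int)) k) ((fun _ => (0:Int)) k))) from rfl]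
  rw [pvLoop_char _ _ hL]
  simp [pvTot, pvInn, List.map_map, Function.comp_def, pvOneB_eq]
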